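-- pv_equiv track=rewrite | github.com/emarberg/schurp | keys.py | symmetrize_strict_partition
-- ===== SOURCE A (Python) =====
-- def symmetrize_strict_partition(mu, n=None):
--     shape = {(i, i + j - 1) for i in range(1, len(mu) + 1) for j in range(1, mu[i - 1] + 1)}
--     shape |= {(j, i) for (i, j) in shape}
--     ans = []
--     for i, _ in shape:
--         while i - 1 >= len(ans):
--             ans.append(0)
--         ans[i - 1] += 1
--
--     if n is not None:
--         ans += (n - len(ans)) * (0,)
--     return tuple(ans)
-- ===== SOURCE B (Python) =====
-- def symmetrize_strict_partition(mu, n=None):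
--     # Per-row counts computed arithmetically from column intervals; no cell enumeration.
--     m = len(mu)
--     M = 0
--     for i in range(1, m + 1):
--         if mu[i - 1] >= 1:
--             M = max(M, i + mu[i - 1] - 1)
--     ans = []
--     for r in range(1, M + 1):
--         row = mu[r - 1] if r <= m and mu[r - 1] > 0 else 0
--         for c in range(1, min(r, m + 1)):
--             if c + mu[c - 1] - 1 >= r:
--                 row += 1
--         ans.append(row)
--     if n is not None:
--         ans += (n - M) * [0]
--     return tuple(ans)
-- ===== Notes on version B (the rewrite author's own statement) =====
-- stated objective: alternative
-- what changed: B computes each row length arithmetically (own-row interval length plus a count of earlier rows whose reflected interval reaches the row) instead of enumerating the cell set, symmetrizing it and tallying cells.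
import Mathlib
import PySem

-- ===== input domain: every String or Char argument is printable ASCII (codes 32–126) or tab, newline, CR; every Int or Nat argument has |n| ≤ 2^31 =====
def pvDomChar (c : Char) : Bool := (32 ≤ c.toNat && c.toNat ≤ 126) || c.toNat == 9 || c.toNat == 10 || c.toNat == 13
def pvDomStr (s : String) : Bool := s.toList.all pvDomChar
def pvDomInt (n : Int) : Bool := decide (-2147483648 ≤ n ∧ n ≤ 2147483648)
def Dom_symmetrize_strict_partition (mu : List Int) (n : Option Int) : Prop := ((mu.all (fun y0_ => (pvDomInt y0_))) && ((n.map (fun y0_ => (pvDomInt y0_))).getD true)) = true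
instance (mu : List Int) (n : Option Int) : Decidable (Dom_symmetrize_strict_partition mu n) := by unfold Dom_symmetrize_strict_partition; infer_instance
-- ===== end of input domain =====

-- B replaces A's cell-set enumeration by a per-row arithmetic count (alternative decomposition, not claimed faster).
-- The set iteration in A only tallies first components, so its result is independent of Python's hash order.

-- ===== PORT A =====
-- mu[i-1] is ported as pyGetD mu (i-1) 0: exact, since i ranges over 1..len(mu) so the index is always in range.
def symmetrize_strict_partition (mu : List Int) (n : Option Int) : List Int :=
  let m : Int := (mu.length : Int)
  let base : List (Int × Int) :=
    (PySem.List.pyRange 1 (m + 1) 1).flatMap (fun i =>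
      (PySem.List.pyRange 1 (PySem.List.pyGetD mu (i - 1) 0 + 1) 1).map (fun j => (i, i + j - 1)))
  let shape : PySem.Set (Int × Int) := PySem.Set.ofList base
  let shape : PySem.Set (Int × Int) := PySem.Set.union shape (shape.map (fun p => (p.2, p.1)))
  -- 'for i, _ in shape: while i-1 >= len(ans): ans.append(0); ans[i-1] += 1'
  let ans : List Int := shape.foldl (fun ans p =>
    (ans ++ List.replicate ((p.1).toNat - ans.length) 0).modify ((p.1 - 1).toNat) (· + 1)) []
  match n with
  | none => ans
  | some nv => ans ++ List.replicate (nv - (ans.length : Int)).toNat 0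

-- ===== PORT B =====
def symmetrize_strict_partition_alt (mu : List Int) (n : Option Int) : List Int :=
  let m : Int := (mu.length : Int)
  let M : Int := (PySem.List.pyRange 1 (m + 1) 1).foldl (fun M i =>
    if PySem.List.pyGetD mu (i - 1) 0 ≥ 1 then max M (i + PySem.List.pyGetD mu (i - 1) 0 - 1) else M) 0
  let ans : List Int := (PySem.List.pyRange 1 (M + 1) 1).foldl (fun ans r =>
    let row : Int := if r ≤ m ∧ PySem.List.pyGetD mu (r - 1) 0 > 0 then PySem.List.pyGetD mu (r - 1) 0 else 0
    let row : Int := (PySem.List.pyRange 1 (min r (m + 1)) 1).foldl (fun row c =>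
      if c + PySem.List.pyGetD mu (c - 1) 0 - 1 ≥ r then row + 1 else row) row
    ans ++ [row]) []
  match n with
  | none => ans
  | some nv => ans ++ List.replicate (nv - M).toNat 0

-- ===== PRECONDITION & SPEC =====
def Spec_symmetrize_strict_partition (mu : List Int) (n : Option Int) (out : List Int) : Prop := out = symmetrize_strict_partition_alt mu n
instance (mu : List Int) (n : Option Int) (out : List Int) : Decidable (Spec_symmetrize_strict_partition mu n out) := by unfold Spec_symmetrize_strict_partition; infer_instance

-- ===== CLAIM (what is proved, stated in full; the proofs are below) =====
def Claim_equal_symmetrize_strict_partition : Prop := ∀ (mu : List Int) (n : Option Int), Dom_symmetrize_strict_partition mu n → Spec_symmetrize_strict_partition mu n (symmetrize_strict_partition mu n)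

-- ===== LEMMAS AND PROOFS =====

def stepA (ans : List Int) (p : Int × Int) : List Int :=
  (ans ++ List.replicate ((p.1).toNat - ans.length) 0).modify ((p.1 - 1).toNat) (· + 1)

lemma length_stepA (ans : List Int) (p : Int × Int) :
    (stepA ans p).length = max ans.length (p.1).toNat := by
  simp [stepA]; omega

lemma getD_pad (ans : List Int) (c k : Nat) :
    (ans ++ List.replicate c (0:Int)).getD k 0 = ans.getD k 0 := by
  simp only [List.getD_eq_getElem?_getD, List.getElem?_append, List.getElem?_replicate]
  split
  · rfl
  · rename_i h
    rw [List.getElem?_eq_none_iff.2 (by omega)]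
    split <;> rfl

lemma getD_stepA (ans : List Int) (p : Int × Int) (h : 1 ≤ p.1) (k : Nat) :
    (stepA ans p).getD k 0 = ans.getD k 0 + (if p.1 = (k+1 : Int) then 1 else 0) := by
  have hpad := getD_pad ans ((p.1).toNat - ans.length) k
  unfold stepA
  simp only [List.getD_eq_getElem?_getD, List.getElem?_modify] at *
  by_cases hk : (p.1 - 1).toNat = k
  · have hif : p.1 = (k+1 : Int) := by omega
    have hlt : k < (ans ++ List.replicate ((p.1).toNat - ans.length) (0:Int)).length := by
      simp; omega
    rw [List.getElem?_eq_getElem hlt] at *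
    simp [hif] at *
    omega
  · have hif : ¬ p.1 = (k+1 : Int) := by omega
    simp [hif]
    cases hx : (ans ++ List.replicate ((p.1).toNat - ans.length) (0:Int))[k]? <;>
      (simp [hx] at hpad ⊢; omega)

lemma foldA (L : List (Int × Int)) (hL : ∀ p ∈ L, 1 ≤ p.1) (ans : List Int) :
    (L.foldl stepA ans).length = L.foldl (fun a p => max a (p.1).toNat) ans.length ∧
    ∀ k : Nat, (L.foldl stepA ans).getD k 0 = ans.getD k 0 + (L.countP (fun p => p.1 == ((k:Int)+1)) : Int) := by
  induction L generalizing ans with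
  | nil => simp
  | cons q t ih =>
    have hq : 1 ≤ q.1 := hL q (by simp)
    obtain ⟨ih1, ih2⟩ := ih (fun p hp => hL p (by simp [hp])) (stepA ans q)
    refine ⟨by simp only [List.foldl_cons, ih1, length_stepA], fun k => ?_⟩
    rw [List.foldl_cons, ih2 k, getD_stepA ans q hq k, List.countP_cons]
    by_cases hc : q.1 = (k:Int)+1 <;> simp [hc]
    ring

def gA (mu : List Int) (i : Int) : Int := PySem.List.pyGetD mu (i - 1) 0

def baseL (mu : List Int) : List (Int × Int) :=
  (PySem.List.pyRange 1 ((mu.length : Int) + 1) 1).flatMap (fun i =>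
    (PySem.List.pyRange 1 (gA mu i + 1) 1).map (fun j => (i, i + j - 1)))

def shapeL (mu : List Int) : List (Int × Int) :=
  PySem.Set.union (PySem.Set.ofList (baseL mu)) ((PySem.Set.ofList (baseL mu)).map (fun p => (p.2, p.1)))

def ansA (mu : List Int) : List Int := (shapeL mu).foldl stepA []

lemma A_unfold (mu : List Int) (n : Option Int) : symmetrize_strict_partition mu n =
    (match n with
     | none => ansA mu
     | some nv => ansA mu ++ List.replicate (nv - ((ansA mu).length : Int)).toNat 0) := rfl

def inS (mu : List Int) (i j : Int) : Prop :=
  1 ≤ i ∧ i ≤ (mu.length : Int) ∧ i ≤ j ∧ j ≤ i + gA mu i - 1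

def PP (mu : List Int) (r c : Int) : Prop := inS mu r c ∨ inS mu c r

lemma mem_baseL (mu : List Int) (r c : Int) : (r, c) ∈ baseL mu ↔ inS mu r c := by
  simp only [baseL, List.mem_flatMap, List.mem_map, PySem.List.mem_pyRange_one, Prod.mk.injEq, inS]
  constructor
  · rintro ⟨i, ⟨h1, h2⟩, j, ⟨h3, h4⟩, rfl, rfl⟩
    omega
  · rintro ⟨h1, h2, h3, h4⟩
    exact ⟨r, ⟨h1, by omega⟩, c - r + 1, ⟨by omega, by omega⟩, rfl, by ring⟩

lemma mem_shapeL (mu : List Int) (r c : Int) : (r, c) ∈ shapeL mu ↔ PP mu r c := by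
  simp only [shapeL, PySem.Set.mem_union, PySem.Set.mem_ofList, List.mem_map, PP]
  constructor
  · rintro (h | ⟨p, hp, he⟩)
    · exact Or.inl ((mem_baseL mu r c).1 h)
    · refine Or.inr ((mem_baseL mu c r).1 ?_)
      obtain ⟨he1, he2⟩ := Prod.mk.injEq .. ▸ he
      rcases p with ⟨a, b⟩; simp_all
  · rintro (h | h)
    · exact Or.inl ((mem_baseL mu r c).2 h)
    · exact Or.inr ⟨(c, r), (mem_baseL mu c r).2 h, rfl⟩

lemma nodup_shapeL (mu : List Int) : (shapeL mu).Nodup :=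
  PySem.Set.nodup_union _ _ (PySem.Set.nodup_ofList _)

lemma fst_pos_of_mem_shapeL (mu : List Int) (p : Int × Int) (hp : p ∈ shapeL mu) : 1 ≤ p.1 := by
  rcases p with ⟨r, c⟩
  rcases (mem_shapeL mu r c).1 hp with h | h
  · exact h.1
  · obtain ⟨h1, _, h3, _⟩ := h; omega

lemma foldl_max_int_spec {α : Type} (f : α → Int) (L : List α) (a : Int) :
    a ≤ L.foldl (fun acc x => max acc (f x)) a ∧
    (∀ x ∈ L, f x ≤ L.foldl (fun acc x => max acc (f x)) a) ∧
    (L.foldl (fun acc x => max acc (f x)) a = a ∨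
      ∃ x ∈ L, L.foldl (fun acc x => max acc (f x)) a = f x) := by
  induction L generalizing a with
  | nil => simp
  | cons h t ih =>
    obtain ⟨i1, i2, i3⟩ := ih (max a (f h))
    simp only [List.foldl_cons]
    refine ⟨le_trans (le_max_left _ _) i1, ?_, ?_⟩
    · intro x hx
      rcases List.mem_cons.1 hx with rfl | hx
      · exact le_trans (le_max_right _ _) i1
      · exact i2 x hx
    · rcases i3 with h3 | ⟨x, hx, hfx⟩
      · rcases max_choice a (f h) with hm | hm
        · exact Or.inl (h3.trans hm)
        · exact Or.inr ⟨h, by simp, h3.trans hm⟩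
      · exact Or.inr ⟨x, by simp [hx], hfx⟩

lemma foldl_max_nat_spec {α : Type} (f : α → Nat) (L : List α) (a : Nat) :
    a ≤ L.foldl (fun acc x => max acc (f x)) a ∧
    (∀ x ∈ L, f x ≤ L.foldl (fun acc x => max acc (f x)) a) ∧
    (L.foldl (fun acc x => max acc (f x)) a = a ∨
      ∃ x ∈ L, L.foldl (fun acc x => max acc (f x)) a = f x) := by
  induction L generalizing a with
  | nil => simp
  | cons h t ih =>
    obtain ⟨i1, i2, i3⟩ := ih (max a (f h))
    simp only [List.foldl_cons]
    refine ⟨le_trans (le_max_left _ _) i1, ?_, ?_⟩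
    · intro x hx
      rcases List.mem_cons.1 hx with rfl | hx
      · exact le_trans (le_max_right _ _) i1
      · exact i2 x hx
    · rcases i3 with h3 | ⟨x, hx, hfx⟩
      · rcases max_choice a (f h) with hm | hm
        · exact Or.inl (h3.trans hm)
        · exact Or.inr ⟨h, by simp, h3.trans hm⟩
      · exact Or.inr ⟨x, by simp [hx], hfx⟩

def MB (mu : List Int) : Int :=
  (PySem.List.pyRange 1 ((mu.length : Int) + 1) 1).foldl (fun M i =>
    if gA mu i ≥ 1 then max M (i + gA mu i - 1) else M) 0

def ansB (mu : List Int) : List Int :=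
  (PySem.List.pyRange 1 (MB mu + 1) 1).foldl (fun ans r =>
    let row : Int := if r ≤ (mu.length : Int) ∧ gA mu r > 0 then gA mu r else 0
    let row : Int := (PySem.List.pyRange 1 (min r ((mu.length : Int) + 1)) 1).foldl (fun row c =>
      if c + gA mu c - 1 ≥ r then row + 1 else row) row
    ans ++ [row]) []

lemma B_unfold (mu : List Int) (n : Option Int) : symmetrize_strict_partition_alt mu n =
    (match n with
     | none => ansB mu
     | some nv => ansB mu ++ List.replicate (nv - MB mu).toNat 0) := rfl

lemma MB_spec (mu : List Int) :
    0 ≤ MB mu ∧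
    (∀ i : Int, 1 ≤ i → i ≤ (mu.length : Int) → 1 ≤ gA mu i → i + gA mu i - 1 ≤ MB mu) ∧
    (MB mu = 0 ∨ ∃ i : Int, 1 ≤ i ∧ i ≤ (mu.length : Int) ∧ 1 ≤ gA mu i ∧ MB mu = i + gA mu i - 1) := by
  have he : MB mu = ((PySem.List.pyRange 1 ((mu.length : Int) + 1) 1).filter
      (fun i => decide (gA mu i ≥ 1))).foldl (fun M i => max M (i + gA mu i - 1)) 0 :=
    PySem.List.foldl_ite_eq_foldl_filter _ _ _ _
  obtain ⟨h1, h2, h3⟩ := foldl_max_int_spec (fun i => i + gA mu i - 1)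
    ((PySem.List.pyRange 1 ((mu.length : Int) + 1) 1).filter (fun i => decide (gA mu i ≥ 1))) 0
  rw [← he] at h1 h2 h3
  refine ⟨h1, fun i hi1 hi2 hig => h2 i ?_, ?_⟩
  · simp only [List.mem_filter, PySem.List.mem_pyRange_one, decide_eq_true_iff]
    exact ⟨⟨hi1, by omega⟩, by omega⟩
  · rcases h3 with h | ⟨i, hi, hfx⟩
    · exact Or.inl h
    · simp only [List.mem_filter, PySem.List.mem_pyRange_one, decide_eq_true_iff] at hi
      exact Or.inr ⟨i, hi.1.1, by omega, by omega, hfx⟩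

def MAn (mu : List Int) : Nat := (shapeL mu).foldl (fun a p => max a (p.1).toNat) 0

lemma length_ansA (mu : List Int) : (ansA mu).length = MAn mu := by
  have := (foldA (shapeL mu) (fst_pos_of_mem_shapeL mu) []).1
  simpa [ansA, MAn] using this

lemma getD_ansA (mu : List Int) (k : Nat) :
    (ansA mu).getD k 0 = ((shapeL mu).countP (fun p => p.1 == ((k : Int) + 1)) : Int) := by
  have := (foldA (shapeL mu) (fst_pos_of_mem_shapeL mu) []).2 k
  simpa [ansA] using this

lemma fst_le_MB_of_mem_shapeL (mu : List Int) (p : Int × Int) (hp : p ∈ shapeL mu) :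
    p.1 ≤ MB mu := by
  obtain ⟨_, hub, _⟩ := MB_spec mu
  rcases p with ⟨r, c⟩
  rcases (mem_shapeL mu r c).1 hp with ⟨h1, h2, h3, h4⟩ | ⟨h1, h2, h3, h4⟩
  · have := hub r h1 h2 (by omega); omega
  · have := hub c h1 h2 (by omega); omega

lemma MAn_eq (mu : List Int) : MAn mu = (MB mu).toNat := by
  obtain ⟨hnn, hub, hat⟩ := MB_spec mu
  obtain ⟨n1, n2, n3⟩ := foldl_max_nat_spec (fun p => (p.1).toNat) (shapeL mu) 0
  have hMAn : MAn mu = (shapeL mu).foldl (fun a p => max a (p.1).toNat) 0 := rfl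
  apply Nat.le_antisymm
  · rcases n3 with h | ⟨p, hp, hfx⟩
    · rw [hMAn, h]; omega
    · rw [hMAn, hfx]
      have := fst_le_MB_of_mem_shapeL mu p hp
      omega
  · rcases hat with h | ⟨i, hi1, hi2, hig, hM⟩
    · omega
    · have hmem : (i + gA mu i - 1, i) ∈ shapeL mu := by
        refine (mem_shapeL mu _ _).2 (Or.inr ⟨hi1, hi2, by omega, by omega⟩)
      have := n2 _ hmem
      rw [hMAn] at *
      simp only at this
      omega

def TL (mu : List Int) (r : Int) : List Int :=
  (if 1 ≤ r ∧ r ≤ (mu.length : Int) ∧ 1 ≤ gA mu r then PySem.List.pyRange r (r + gA mu r) 1 else []) ++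
  (PySem.List.pyRange 1 (min r ((mu.length : Int) + 1)) 1).filter (fun c => decide (c + gA mu c - 1 ≥ r))

lemma mem_TL (mu : List Int) (r c : Int) : c ∈ TL mu r ↔ PP mu r c := by
  simp only [TL, List.mem_append, List.mem_filter, PySem.List.mem_pyRange_one,
    decide_eq_true_iff, PP, inS]
  split
  · rename_i hg
    simp only [PySem.List.mem_pyRange_one]
    constructor
    · rintro (⟨h1, h2⟩ | ⟨⟨h1, h2⟩, h3⟩) <;> omega
    · rintro (⟨h1, h2, h3, h4⟩ | ⟨h1, h2, h3, h4⟩)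
      · omega
      · rcases eq_or_lt_of_le h3 with rfl | hlt <;> omega
  · rename_i hg
    simp only [List.not_mem_nil, false_or]
    constructor
    · rintro ⟨⟨h1, h2⟩, h3⟩; omega
    · rintro (⟨h1, h2, h3, h4⟩ | ⟨h1, h2, h3, h4⟩)
      · omega
      · rcases eq_or_lt_of_le h3 with rfl | hlt <;> omega

lemma nodup_TL (mu : List Int) (r : Int) : (TL mu r).Nodup := by
  refine List.Nodup.append ?_ (List.Nodup.filter _ (PySem.List.nodup_pyRange_one _ _)) ?_
  · split
    · exact PySem.List.nodup_pyRange_one _ _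
    · exact List.nodup_nil
  · intro c hc1 hc2
    have h2 := List.mem_filter.1 hc2
    have := (PySem.List.mem_pyRange_one).1 h2.1
    split at hc1
    · have := (PySem.List.mem_pyRange_one).1 hc1
      omega
    · simp at hc1

lemma count_shape_eq_TL (mu : List Int) (r : Int) :
    (shapeL mu).countP (fun p => p.1 == r) = (TL mu r).length := by
  rw [List.countP_eq_length_filter]
  have h1 : ∀ p ∈ (shapeL mu).filter (fun p => p.1 == r), p.1 = r := by
    intro p hp
    simpa using (List.mem_filter.1 hp).2
  have hnd : ((shapeL mu).filter (fun p => p.1 == r)).Nodup := (nodup_shapeL mu).filter _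
  have hmapnd : (((shapeL mu).filter (fun p => p.1 == r)).map Prod.snd).Nodup := by
    refine List.Nodup.map_on ?_ hnd
    intro x hx y hy hxy
    have := h1 x hx
    have := h1 y hy
    exact Prod.ext (by omega) hxy
  have hmem : ∀ c, c ∈ ((shapeL mu).filter (fun p => p.1 == r)).map Prod.snd ↔ PP mu r c := by
    intro c
    simp only [List.mem_map, List.mem_filter, beq_iff_eq]
    constructor
    · rintro ⟨p, ⟨hp, hpr⟩, rfl⟩
      rcases p with ⟨a, b⟩
      subst hpr
      exact (mem_shapeL mu _ _).1 hp
    · intro h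
      exact ⟨(r, c), ⟨(mem_shapeL mu r c).2 h, rfl⟩, rfl⟩
  have hperm : (((shapeL mu).filter (fun p => p.1 == r)).map Prod.snd).Perm (TL mu r) :=
    (List.perm_ext_iff_of_nodup hmapnd (nodup_TL mu r)).2
      (fun c => (hmem c).trans (mem_TL mu r c).symm)
  calc ((shapeL mu).filter (fun p => p.1 == r)).length
      = (((shapeL mu).filter (fun p => p.1 == r)).map Prod.snd).length := (List.length_map _).symm
    _ = (TL mu r).length := hperm.length_eq

lemma length_TL (mu : List Int) (r : Int) (hr : 1 ≤ r) : ((TL mu r).length : Int) =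
    (if r ≤ (mu.length : Int) ∧ gA mu r > 0 then gA mu r else 0) +
    (((PySem.List.pyRange 1 (min r ((mu.length : Int) + 1)) 1).countP
      (fun c => decide (c + gA mu c - 1 ≥ r)) : Nat) : Int) := by
  simp only [TL, List.length_append, List.countP_eq_length_filter]
  push_cast
  by_cases h : r ≤ (mu.length : Int) ∧ gA mu r > 0
  · rw [if_pos (by exact ⟨hr, h.1, by omega⟩), if_pos h, PySem.List.length_pyRange_one]
    omega
  · rw [if_neg (by omega), if_neg h]
    simp

def rowB (mu : List Int) (r : Int) : Int :=
  (if r ≤ (mu.length : Int) ∧ gA mu r > 0 then gA mu r else 0) +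
  (((PySem.List.pyRange 1 (min r ((mu.length : Int) + 1)) 1).countP
    (fun c => decide (c + gA mu c - 1 ≥ r)) : Nat) : Int)

lemma ansB_eq_map (mu : List Int) : ansB mu = (PySem.List.pyRange 1 (MB mu + 1) 1).map (rowB mu) := by
  have he : ansB mu = (PySem.List.pyRange 1 (MB mu + 1) 1).foldl (fun ans r => ans ++ [
      (PySem.List.pyRange 1 (min r ((mu.length : Int) + 1)) 1).foldl (fun row c =>
        if c + gA mu c - 1 ≥ r then row + 1 else row)
        (if r ≤ (mu.length : Int) ∧ gA mu r > 0 then gA mu r else 0)]) [] := rfl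
  rw [he, PySem.List.foldl_append_singleton_eq_map, List.nil_append]
  refine List.map_congr_left ?_
  intro r hr
  rw [PySem.List.foldl_ite_add_one]
  rfl

lemma length_ansB_int (mu : List Int) : ((ansB mu).length : Int) = MB mu := by
  rw [ansB_eq_map, List.length_map, PySem.List.length_pyRange_one]
  have := (MB_spec mu).1
  omega

lemma ansA_eq_ansB (mu : List Int) : ansA mu = ansB mu := by
  rw [ansB_eq_map]
  have hlen : (ansA mu).length = ((PySem.List.pyRange 1 (MB mu + 1) 1).map (rowB mu)).length := by
    rw [length_ansA, MAn_eq, List.length_map, PySem.List.length_pyRange_one]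
    omega
  refine List.ext_getElem hlen ?_
  intro k h1 h2
  rw [List.getElem_map, PySem.List.getElem_pyRange_one]
  have hA : (ansA mu)[k] = (ansA mu).getD k 0 := (List.getD_eq_getElem _ _ h1).symm
  rw [hA, getD_ansA, count_shape_eq_TL mu ((k : Int) + 1),
    length_TL mu ((k : Int) + 1) (by omega)]
  have h1k : (1 : Int) + (k : Int) = (k : Int) + 1 := by ring
  rw [rowB, h1k]

-- ===== VERDICT (by name: the statement is the Claim_ definition above) =====
theorem symmetrize_strict_partition_spec : Claim_equal_symmetrize_strict_partition := by
  intro mu n _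
  show symmetrize_strict_partition mu n = symmetrize_strict_partition_alt mu n
  rw [A_unfold, B_unfold]
  cases n with
  | none => exact ansA_eq_ansB mu
  | some nv =>
    simp only
    rw [ansA_eq_ansB, length_ansB_int]
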